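-- pv_equiv track=rewrite | github.com/VoropaevIvan/EGE | course/27 Анализ данных/К.Ю. Поляков/7653 А.py | find_centre
-- ===== SOURCE A (Python) =====
-- def find_centre(cluster):
--     min_sum = 10 ** 10
--     centre = [-1, -1]
--     for x1, y1 in cluster:
--         cur_sum = 0
--         for x2, y2 in cluster:
--             cur_sum += max(abs(x1 - x2), abs(y1 - y2))
--         if cur_sum < min_sum:
--             min_sum = cur_sum
--             centre = [x1, y1]
--     return centre
-- ===== SOURCE B (Python) =====
-- def find_centre(cluster):
--     # Rotate to (x+y, x-y): Chebyshev distance = (|du| + |dv|) / 2; each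
--     # coordinate's absolute-difference sums come from sort + prefix sums.
--     n = len(cluster)
--
--     def dist_sums(vals):
--         # g[t] = sum of |t - a| over vals, via one pass over the sorted list
--         s = sorted(vals)
--         total = sum(s)
--         g = {}
--         pre = 0
--         for k, t in enumerate(s):
--             g[t] = (k * t - pre) + (total - pre) - (n - k) * t
--             pre += t
--         return g
--
--     gu = dist_sums([x + y for x, y in cluster])
--     gv = dist_sums([x - y for x, y in cluster])
--     min_sum = 10 ** 10
--     centre = [-1, -1]
--     for x, y in cluster:
--         cur_sum = (gu[x + y] + gv[x - y]) // 2
--         if cur_sum < min_sum: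
--             min_sum = cur_sum
--             centre = [x, y]
--     return centre
-- ===== Notes on version B (the rewrite author's own statement) =====
-- stated objective: faster
-- what changed: B replaces A's quadratic all-pairs Chebyshev scan by rotating each point to (x+y, x-y), so each point's distance sum is the sum of two one-dimensional absolute-difference sums obtained from sorted lists with prefix sums; the selection pass over the per-point sums is unchanged.
import Mathlib
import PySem

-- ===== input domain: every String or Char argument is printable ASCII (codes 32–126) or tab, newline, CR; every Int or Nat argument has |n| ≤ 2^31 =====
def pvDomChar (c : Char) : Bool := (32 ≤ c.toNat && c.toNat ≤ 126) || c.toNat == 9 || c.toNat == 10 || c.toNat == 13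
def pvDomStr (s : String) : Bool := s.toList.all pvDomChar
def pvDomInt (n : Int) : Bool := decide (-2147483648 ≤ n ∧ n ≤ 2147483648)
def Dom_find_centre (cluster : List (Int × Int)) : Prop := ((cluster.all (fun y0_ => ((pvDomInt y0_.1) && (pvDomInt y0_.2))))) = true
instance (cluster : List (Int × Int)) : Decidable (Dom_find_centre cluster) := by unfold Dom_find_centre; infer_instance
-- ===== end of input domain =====

-- B computes each point's total Chebyshev distance via rotated coordinates (x+y, x-y),
-- sorting and prefix sums (O(n log n)) instead of A's all-pairs scan (O(n^2)).

-- ===== PORT A =====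
def find_centre (cluster : List (Int × Int)) : List Int :=
  (cluster.foldl (fun st p1 =>
      let cur_sum := cluster.foldl (fun acc p2 => acc + max |p1.1 - p2.1| |p1.2 - p2.2|) 0
      if cur_sum < st.1 then (cur_sum, [p1.1, p1.2]) else st)
    ((10 : Int) ^ 10, [-1, -1])).2

-- ===== PORT B =====
-- the 'for k, t in enumerate(s): g[t] = …; pre += t' loop of dist_sums
def distGo (n total : Int) : List Int → Int → Int → PySem.Dict Int Int → PySem.Dict Int Int
  | [], _, _, g => g
  | t :: rest, k, pre, g =>
      distGo n total rest (k + 1) (pre + t)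
        (g.insert t ((k * t - pre) + (total - pre) - (n - k) * t))

def distSums (n : Int) (vals : List Int) : PySem.Dict Int Int :=
  distGo n ((PySem.List.sorted vals (fun x => x) false).foldl (· + ·) 0)
    (PySem.List.sorted vals (fun x => x) false) 0 0 PySem.Dict.empty

def find_centre_alt (cluster : List (Int × Int)) : List Int :=
  let n : Int := cluster.length
  let gu := distSums n (cluster.map (fun p => p.1 + p.2))
  let gv := distSums n (cluster.map (fun p => p.1 - p.2))
  (cluster.foldl (fun st p =>
      -- gu[x+y] / gv[x-y]: the keys were built from this same list, so lookup never misses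
      let cur_sum := PySem.Int.floordiv ((gu.get? (p.1 + p.2)).getD 0 + (gv.get? (p.1 - p.2)).getD 0) 2
      if cur_sum < st.1 then (cur_sum, [p.1, p.2]) else st)
    ((10 : Int) ^ 10, [-1, -1])).2

-- ===== PRECONDITION & SPEC =====
def Spec_find_centre (cluster : List (Int × Int)) (out : List Int) : Prop := out = find_centre_alt cluster
instance (cluster : List (Int × Int)) (out : List Int) : Decidable (Spec_find_centre cluster out) := by unfold Spec_find_centre; infer_instance

-- ===== CLAIM (what is proved, stated in full; the proofs are below) =====
def Claim_equal_find_centre : Prop := ∀ (cluster : List (Int × Int)), Dom_find_centre cluster → Spec_find_centre cluster (find_centre cluster)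

-- ===== LEMMAS AND PROOFS =====

-- sum of |t - a| over a list of elements all ≤ t
theorem sum_abs_left (l : List Int) (t : Int) (h : ∀ a ∈ l, a ≤ t) :
    (l.map (fun a => |t - a|)).sum = l.length * t - l.sum := by
  induction l with
  | nil => simp
  | cons x xs ih =>
    have hx : x ≤ t := h x (by simp)
    have := ih (fun a ha => h a (by simp [ha]))
    simp only [List.map_cons, List.sum_cons, List.length_cons, this]
    rw [abs_of_nonneg (by omega)]
    push_cast; ring

-- sum of |t - a| over a list of elements all ≥ t
theorem sum_abs_right (l : List Int) (t : Int) (h : ∀ a ∈ l, t ≤ a) :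
    (l.map (fun a => |t - a|)).sum = l.sum - l.length * t := by
  induction l with
  | nil => simp
  | cons x xs ih =>
    have hx : t ≤ x := h x (by simp)
    have := ih (fun a ha => h a (by simp [ha]))
    simp only [List.map_cons, List.sum_cons, List.length_cons, this]
    rw [abs_of_nonpos (by omega)]
    push_cast; ring

-- invariant of the dist_sums loop over the sorted list s
theorem distGo_get? (s : List Int) (hs : s.Pairwise (· ≤ ·)) :
    ∀ (l2 l1 : List Int) (g : PySem.Dict Int Int), s = l1 ++ l2 →
    ∀ t : Int, (distGo s.length s.sum l2 l1.length l1.sum g).get? t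
      = if t ∈ l2 then some ((s.map (fun a => |t - a|)).sum) else g.get? t := by
  intro l2
  induction l2 with
  | nil => intro l1 g _ t; simp [distGo]
  | cons x rest ih =>
    intro l1 g hsplit t
    have hval : ((l1.length : Int) * x - l1.sum) + ((s.sum : Int) - l1.sum) - ((s.length : Int) - l1.length) * x
        = (s.map (fun a => |x - a|)).sum := by
      subst hsplit
      have hpw := hs
      rw [List.pairwise_append] at hpw
      have hle : ∀ a ∈ l1, a ≤ x := fun a ha => hpw.2.2 a ha x (by simp)
      have hge : ∀ a ∈ rest, x ≤ a := by
        have := hpw.2.1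
        rw [List.pairwise_cons] at this
        exact fun a ha => this.1 a ha
      rw [List.map_append, List.map_cons]
      simp only [List.sum_append, List.sum_cons, List.length_append, List.length_cons,
        sub_self, abs_zero]
      rw [sum_abs_left l1 x hle, sum_abs_right rest x hge]
      push_cast; ring
    have hstep : distGo s.length s.sum (x :: rest) l1.length l1.sum g
        = distGo s.length s.sum rest (l1.length + 1) (l1.sum + x)
            (g.insert x ((l1.length * x - l1.sum) + (s.sum - l1.sum) - (s.length - l1.length) * x)) := rfl
    rw [hstep]
    have hlen : ((l1 ++ [x]).length : Int) = (l1.length : Int) + 1 := by simp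
    have hsum : (l1 ++ [x]).sum = l1.sum + x := by simp
    have := ih (l1 ++ [x]) (g.insert x ((l1.length * x - l1.sum) + (s.sum - l1.sum) - (s.length - l1.length) * x))
        (by simp [hsplit]) t
    rw [hlen, hsum] at this
    rw [this]
    by_cases hmem : t ∈ rest
    · simp [hmem]
    · by_cases htx : t = x
      · subst htx
        simp [hmem, PySem.Dict.get?_insert_self, hval]
      · rw [PySem.Dict.get?_insert_of_ne _ _ htx]
        have hnc : t ∉ x :: rest := by
          intro hc
          rcases List.mem_cons.mp hc with h | h
          · exact htx h
          · exact hmem h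
        rw [if_neg hnc, if_neg hmem]

-- dist_sums looks up to the absolute-difference sum over the original list
theorem distSums_get? (vals : List Int) (t : Int) (ht : t ∈ vals) :
    (distSums vals.length vals).get? t = some ((vals.map (fun a => |t - a|)).sum) := by
  unfold distSums
  have hperm : (PySem.List.sorted vals (fun x => x) false).Perm vals := PySem.List.sorted_perm vals (fun x => x) false
  have hpw : (PySem.List.sorted vals (fun x => x) false).Pairwise (· ≤ ·) := by
    have := PySem.List.sorted_pairwise (xs := vals) (key := fun x => x)
    simpa using this
  have hfold : (PySem.List.sorted vals (fun x => x) false).foldl (· + ·) 0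
      = (PySem.List.sorted vals (fun x => x) false).sum := by
    have := PySem.List.foldl_add (l := PySem.List.sorted vals (fun x => x) false)
      (g := fun x : Int => x) (a := 0)
    simpa using this
  have hlen : (PySem.List.sorted vals (fun x => x) false).length = vals.length :=
    hperm.length_eq
  have hsum : (PySem.List.sorted vals (fun x => x) false).sum = vals.sum := hperm.sum_eq
  have := distGo_get? (PySem.List.sorted vals (fun x => x) false) hpw
      (PySem.List.sorted vals (fun x => x) false) [] PySem.Dict.empty (by simp) t
  simp only [List.length_nil, List.sum_nil, Nat.cast_zero] at this
  have hmem : t ∈ PySem.List.sorted vals (fun x => x) false := hperm.mem_iff.mpr ht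
  rw [hfold,
    show ((vals.length : Int)) = ((PySem.List.sorted vals (fun x => x) false).length : Int) from
      by rw [hlen],
    this, if_pos hmem]
  simp [(hperm.map (fun a => |t - a|)).sum_eq]

-- pointwise rotation identity: 2 * Chebyshev = |du| + |dv|
theorem cheb_rot (a b : Int) : |a + b| + |a - b| = 2 * max |a| |b| := by
  rcases abs_cases (a + b) with ⟨h1, _⟩ | ⟨h1, _⟩ <;>
    rcases abs_cases (a - b) with ⟨h2, _⟩ | ⟨h2, _⟩ <;>
    rcases abs_cases a with ⟨h3, _⟩ | ⟨h3, _⟩ <;>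
    rcases abs_cases b with ⟨h4, _⟩ | ⟨h4, _⟩ <;>
    rw [max_def] <;> split_ifs <;> omega

-- floor division of an exact double
theorem floordiv_two_mul (m : Int) : PySem.Int.floordiv (2 * m) 2 = m := by
  simp [PySem.Int.floordiv]

-- sum of a pointwise doubling
theorem map_sum_two_mul {α : Type} (l : List α) (f : α → Int) :
    (l.map (fun x => 2 * f x)).sum = 2 * (l.map f).sum := by
  induction l with
  | nil => simp
  | cons x xs ih => simp only [List.map_cons, List.sum_cons, ih]; ring

-- sum of a pointwise sum splits
theorem map_sum_pair {α : Type} (l : List α) (f g : α → Int) :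
    (l.map f).sum + (l.map g).sum = (l.map (fun x => f x + g x)).sum := by
  induction l with
  | nil => simp
  | cons x xs ih => simp only [List.map_cons, List.sum_cons]; omega

-- B's per-point score equals A's inner loop
theorem cur_sum_eq (cluster : List (Int × Int)) (p : Int × Int) (hp : p ∈ cluster) :
    PySem.Int.floordiv
      (((distSums cluster.length (cluster.map (fun q => q.1 + q.2))).get? (p.1 + p.2)).getD 0
        + ((distSums cluster.length (cluster.map (fun q => q.1 - q.2))).get? (p.1 - p.2)).getD 0) 2
    = cluster.foldl (fun acc p2 => acc + max |p.1 - p2.1| |p.2 - p2.2|) 0 := by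
  have hu := distSums_get? (cluster.map (fun q => q.1 + q.2)) (p.1 + p.2)
      (List.mem_map_of_mem hp)
  have hv := distSums_get? (cluster.map (fun q => q.1 - q.2)) (p.1 - p.2)
      (List.mem_map_of_mem hp)
  rw [List.length_map] at hu hv
  rw [hu, hv]
  simp only [Option.getD_some, List.map_map]
  rw [map_sum_pair]
  have hpt : (fun q : Int × Int =>
        ((fun a => |p.1 + p.2 - a|) ∘ fun q : Int × Int => q.1 + q.2) q
        + ((fun a => |p.1 - p.2 - a|) ∘ fun q : Int × Int => q.1 - q.2) q)
      = fun q : Int × Int => 2 * max |p.1 - q.1| |p.2 - q.2| := by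
    funext q
    simp only [Function.comp]
    have := cheb_rot (p.1 - q.1) (p.2 - q.2)
    have h1 : p.1 + p.2 - (q.1 + q.2) = (p.1 - q.1) + (p.2 - q.2) := by ring
    have h2 : p.1 - p.2 - (q.1 - q.2) = (p.1 - q.1) - (p.2 - q.2) := by ring
    rw [h1, h2, this]
  rw [hpt]
  rw [map_sum_two_mul cluster (fun q : Int × Int => max |p.1 - q.1| |p.2 - q.2|),
    floordiv_two_mul, PySem.List.foldl_add]
  simp

theorem find_centre_spec : Claim_equal_find_centre := by
  intro cluster _
  unfold Spec_find_centre find_centre find_centre_alt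
  dsimp only
  congr 1
  apply PySem.List.foldl_congr_mem
  intro acc x hx
  rw [← cur_sum_eq cluster x hx]
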